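-- pv_equiv track=rewrite | github.com/michaelkimm/Algorithm-problem-solving-thought-process-re-record | Python/Programmers/BadUser.py | get_ids_matched
-- ===== SOURCE A (Python) =====
-- def check_id_matched(key, value):
--     if len(key) != len(value):
--         return False
--     idx = 0
--     while key[idx] == value[idx] or key[idx] == '*':
--         idx += 1
--         if idx == len(key):
--             break
--     return True if idx == len(key) else False
--
-- def get_ids_matched(banned_id, user_ids):
--     matched = []
--     for user_id in user_ids:
--         if check_id_matched(banned_id, user_id):
--             matched.append(1)
--         else:
--             matched.append(0)
--     return matched
-- ===== SOURCE B (Python) =====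
-- def get_ids_matched(banned_id, user_ids):
--     n = len(banned_id)
--     ok = {i for i, u in enumerate(user_ids) if len(u) == n}
--     for j, c in enumerate(banned_id):
--         if c != '*':
--             ok = {i for i in ok if user_ids[i][j] == c}
--     return [1 if i in ok else 0 for i in range(len(user_ids))]
-- ===== Notes on version B (the rewrite author's own statement) =====
-- stated objective: alternative
-- what changed: B inverts the traversal: instead of scanning each user id character by character against the pattern, it keeps a set of surviving id indices and sieves it column-wise, once per fixed (non-'*') pattern position, then emits 1 for indices that survive.
import Mathlib
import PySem

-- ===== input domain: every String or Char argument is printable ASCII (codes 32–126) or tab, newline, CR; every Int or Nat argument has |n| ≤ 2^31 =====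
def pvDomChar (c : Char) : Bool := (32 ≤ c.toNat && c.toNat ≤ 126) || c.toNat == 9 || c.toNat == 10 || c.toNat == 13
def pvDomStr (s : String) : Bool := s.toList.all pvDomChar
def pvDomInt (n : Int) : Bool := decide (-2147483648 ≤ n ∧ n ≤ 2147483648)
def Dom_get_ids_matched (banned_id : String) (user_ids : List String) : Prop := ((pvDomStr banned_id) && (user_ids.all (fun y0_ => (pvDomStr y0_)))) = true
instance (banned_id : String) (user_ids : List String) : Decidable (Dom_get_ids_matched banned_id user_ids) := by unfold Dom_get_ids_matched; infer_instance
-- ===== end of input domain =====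

-- B replaces A's per-id while-loop scan by a column-wise sieve: a set of surviving id
-- indices is narrowed once per fixed pattern position; objective: alternative (similar cost).

-- ===== PORT A =====
-- the while loop of check_id_matched: 'while key[idx] == value[idx] or key[idx] == "*": idx += 1; if idx == len(key): break'
-- the dyadic bound guard is Python's IndexError check (key[idx]/value[idx]); out of range → would raise (only when key = value = "")
def pvCheckLoop (key value : List Char) (idx : Nat) : Bool :=
  if h : idx < key.length ∧ idx < value.length then
    if key[idx]'h.1 == value[idx]'h.2 || key[idx]'h.1 == '*' then
      if idx + 1 == key.length then true        -- break; then idx == len(key) → True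
      else pvCheckLoop key value (idx + 1)
    else false                                   -- loop exits with idx < len(key) → False
  else false                                     -- IndexError in Python (excluded by Pre_)
termination_by key.length - idx
decreasing_by omega

def pvCheckIdMatched (key value : String) : Bool :=
  if key.toList.length ≠ value.toList.length then false
  else pvCheckLoop key.toList value.toList 0

def get_ids_matched (banned_id : String) (user_ids : List String) : List Int :=
  user_ids.foldl (fun matched user_id =>
    if pvCheckIdMatched banned_id user_id then matched ++ [1] else matched ++ [0]) []

-- ===== PORT B =====
-- 'user_ids[i][j] == c' of Source B: index lookups are total in Python here (i, j always in
-- range by construction); ported exactly via Option lookups compared to 'some c'.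
def pvSieveStep (user_ids : List String) (ok : PySem.Set Int) (p : Int × Char) : PySem.Set Int :=
  if p.2 != '*' then
    PySem.Set.ofList (ok.filter (fun i =>
      ((PySem.List.pyGet? user_ids i).bind (fun u => PySem.Str.pyGet? u p.1)) == some p.2))
  else ok

def get_ids_matched_alt (banned_id : String) (user_ids : List String) : List Int :=
  let n := banned_id.toList.length
  let ok0 : PySem.Set Int := PySem.Set.ofList
    (((PySem.List.enumerate user_ids (0 : Int)).filter (fun p => p.2.toList.length == n)).map (fun p => p.1))
  let ok := (PySem.List.enumerate banned_id.toList (0 : Int)).foldl (pvSieveStep user_ids) ok0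
  (PySem.List.pyRange 0 (PySem.List.len user_ids) 1).map (fun i => if ok.contains i then (1 : Int) else 0)

-- ===== PRECONDITION & SPEC =====
-- Pre_ excludes only the inputs on which A raises IndexError: empty banned_id together
-- with an empty user id in the list (check_id_matched("","") evaluates ""[0] in the while
-- condition); A returns no value there, so nothing returned by A is excluded.
def Pre_get_ids_matched (banned_id : String) (user_ids : List String) : Prop :=
  banned_id ≠ "" ∨ "" ∉ user_ids
instance (banned_id : String) (user_ids : List String) : Decidable (Pre_get_ids_matched banned_id user_ids) := by unfold Pre_get_ids_matched; infer_instance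

def pvWitness_get_ids_matched : String × List String := ("ab*d", ["abcd", "abce", "xyz", ""])

def Spec_get_ids_matched (banned_id : String) (user_ids : List String) (out : List Int) : Prop := out = get_ids_matched_alt banned_id user_ids
instance (banned_id : String) (user_ids : List String) (out : List Int) : Decidable (Spec_get_ids_matched banned_id user_ids out) := by unfold Spec_get_ids_matched; infer_instance

-- ===== CLAIM =====
def Claim_equal_get_ids_matched : Prop := ∀ (banned_id : String) (user_ids : List String), Dom_get_ids_matched banned_id user_ids → Pre_get_ids_matched banned_id user_ids → Spec_get_ids_matched banned_id user_ids (get_ids_matched banned_id user_ids)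

-- ===== LEMMAS AND PROOFS =====

-- proof-side common form of the per-user check: structural recursion on both lists
def pvChk : List Char → List Char → Bool
  | [], _ => true
  | b :: bs, [] => (b == '*') && pvChk bs []
  | b :: bs, v :: vs => (b == v || b == '*') && pvChk bs vs

lemma pvCheckLoop_eq_chk (key value : List Char) :
    ∀ fuel idx, key.length - idx = fuel → key.length = value.length → idx < key.length →
    pvCheckLoop key value idx = pvChk (key.drop idx) (value.drop idx) := by
  intro fuel
  induction fuel with
  | zero => intro idx h _ hidx; omega
  | succ n ih =>
    intro idx h hlen hidx
    rw [pvCheckLoop]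
    have h2 : idx < value.length := by omega
    rw [dif_pos ⟨hidx, h2⟩]
    have hk : key.drop idx = key[idx] :: key.drop (idx + 1) := (List.getElem_cons_drop hidx).symm
    have hv : value.drop idx = value[idx] :: value.drop (idx + 1) := (List.getElem_cons_drop h2).symm
    rw [hk, hv, pvChk]
    by_cases hc : (key[idx] == value[idx] || key[idx] == '*') = true
    · rw [if_pos hc, hc, Bool.true_and]
      by_cases hend : idx + 1 = key.length
      · rw [if_pos (by simpa using hend)]
        rw [List.drop_eq_nil_of_le (by omega), List.drop_eq_nil_of_le (by omega), pvChk]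
      · rw [if_neg (by simpa using hend)]
        exact ih (idx + 1) (by omega) hlen (by omega)
    · rw [if_neg hc, Bool.eq_false_iff.mpr hc, Bool.false_and]

lemma pvChk_cons_eq (b : Char) (bs ul : List Char) :
    pvChk (b :: bs) ul = ((b == '*' || ul.head? == some b) && pvChk bs ul.tail) := by
  cases ul with
  | nil =>
    simp only [pvChk, List.head?_nil, List.tail_nil]
    cases (b == '*') <;> simp
  | cons v vs =>
    simp only [pvChk, List.head?_cons, List.tail_cons]
    have hvb : (b == v) = (v == b) := by simp [eq_comm]
    cases hb : (b == '*') <;> cases hv : (v == b) <;> simp [hv, hvb]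

-- B's filtered-enumerate all-check equals pvChk (generalized over the enumerate start)
lemma pvFixedAll_eq_chk (bl : List Char) :
    ∀ (ul0 ul : List Char) (s : Nat), (∀ k, ul0[s + k]? = ul[k]?) →
    (((PySem.List.enumerate bl (s : Int)).filter (fun p => p.2 != '*')).all
      (fun p => ul0[p.1.toNat]? == some p.2)) = pvChk bl ul := by
  induction bl with
  | nil => intro ul0 ul s _; simp [PySem.List.enumerate_nil, pvChk]
  | cons b bs ih =>
    intro ul0 ul s hlook
    rw [PySem.List.enumerate_cons]
    have hstep : ∀ k, ul0[(s + 1) + k]? = ul.tail[k]? := by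
      intro k
      rw [List.getElem?_tail, show s + 1 + k = s + (k + 1) by omega]
      exact hlook (k + 1)
    have hs1 : ((s : Int) + 1) = ((s + 1 : Nat) : Int) := by push_cast; ring
    have hhead : ul0[s]? = ul.head? := by
      have := hlook 0
      simpa [List.head?_eq_getElem?] using this
    rw [pvChk_cons_eq]
    by_cases hb : (b == '*') = true
    · have : (b != '*') = false := by simp_all
      rw [List.filter_cons_of_neg (by simpa using this), hs1, ih ul0 ul.tail (s+1) hstep,
        hb, Bool.true_or, Bool.true_and]
    · have hbf : (b == '*') = false := by simpa using hb
      rw [List.filter_cons_of_pos (by simpa using hbf), List.all_cons, hs1,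
        ih ul0 ul.tail (s+1) hstep]
      simp [Int.toNat_natCast, hhead, hbf]

lemma pvAll_congr_mem {α : Type} (l : List α) (p q : α → Bool) (h : ∀ x ∈ l, p x = q x) :
    l.all p = l.all q := by
  induction l with
  | nil => rfl
  | cons a l ih =>
    simp only [List.all_cons, h a List.mem_cons_self, ih (fun x hx => h x (List.mem_cons_of_mem a hx))]

lemma pvFoldl_eq_map (f : String → Bool) (us : List String) (init : List Int) :
    us.foldl (fun acc u => if f u then acc ++ [1] else acc ++ [0]) init
      = init ++ us.map (fun u => if f u then (1 : Int) else 0) := by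
  induction us generalizing init with
  | nil => simp
  | cons u us ih => by_cases h : f u <;> simp [h, ih]

-- per-user characterisation of A's check by length test + fixed-position all-check
lemma pvElem_eq (banned u : String) (hpre : banned.toList ≠ [] ∨ u.toList ≠ []) :
    pvCheckIdMatched banned u
      = (u.toList.length == banned.toList.length &&
          ((PySem.List.enumerate banned.toList (0 : Int)).filter (fun p => p.2 != '*')).all
            (fun p => u.toList[p.1.toNat]? == some p.2)) := by
  unfold pvCheckIdMatched
  by_cases hlen : banned.toList.length = u.toList.length
  · rw [if_neg (by omega)]
    have hbne : banned.toList ≠ [] := by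
      rcases hpre with h | h
      · exact h
      · intro hc
        apply h
        have h0 : u.toList.length = 0 := by rw [hc] at hlen; simpa using hlen.symm
        exact List.length_eq_zero_iff.mp h0
    have hpos : 0 < banned.toList.length := List.length_pos_of_ne_nil hbne
    rw [pvCheckLoop_eq_chk banned.toList u.toList banned.toList.length 0 (by omega) hlen hpos,
      List.drop_zero, List.drop_zero,
      ← pvFixedAll_eq_chk banned.toList u.toList u.toList 0 (by intro k; simp)]
    simp [hlen.symm]
  · rw [if_pos (by omega)]
    have hf : (u.toList.length == banned.toList.length) = false :=
      beq_eq_false_iff_ne.mpr (fun hc => hlen hc.symm)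
    rw [hf, Bool.false_and]

-- membership after the sieve fold = membership in the start set && all fixed checks
lemma pvSieve_contains (user_ids : List String) (xs : List (Int × Char)) :
    ∀ (ok : PySem.Set Int) (i : Int),
    (xs.foldl (pvSieveStep user_ids) ok).contains i
      = (ok.contains i && (xs.filter (fun p => p.2 != '*')).all (fun p =>
          ((PySem.List.pyGet? user_ids i).bind (fun u => PySem.Str.pyGet? u p.1)) == some p.2)) := by
  induction xs with
  | nil => intro ok i; simp
  | cons p xs ih =>
    intro ok i
    rw [List.foldl_cons]
    by_cases hp : (p.2 != '*') = true
    · have hstep : (pvSieveStep user_ids ok p).contains i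
          = (ok.contains i && (((PySem.List.pyGet? user_ids i).bind (fun u => PySem.Str.pyGet? u p.1)) == some p.2)) := by
        unfold pvSieveStep
        rw [if_pos hp]
        simp [pysem, List.mem_filter]
        cases h2 : ((PySem.List.pyGet? user_ids i).bind fun a => PySem.List.pyGet? a.toList p.1) with
        | none => simp
        | some v => by_cases hv : v = p.2 <;> simp [hv]
      rw [ih, hstep]
      simp only [List.filter_cons, hp, if_true, List.all_cons]
      cases ok.contains i <;> cases (((PySem.List.pyGet? user_ids i).bind (fun u => PySem.Str.pyGet? u p.1)) == some p.2) <;> simp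
    · have hstep : pvSieveStep user_ids ok p = ok := by
        unfold pvSieveStep; rw [if_neg hp]
      rw [hstep, ih]
      simp [Bool.eq_false_iff.mpr hp]

-- membership in the initial set ↔ the length test at a valid index
lemma pvOk0_contains (us : List String) (n : Nat) (k : Nat) (h : k < us.length) :
    (PySem.Set.ofList (((PySem.List.enumerate us (0 : Int)).filter
        (fun p => p.2.toList.length == n)).map (fun p => p.1))).contains ((k : Nat) : Int)
      = (us[k].toList.length == n) := by
  have hmem : ((k : Nat) : Int) ∈ (((PySem.List.enumerate us (0 : Int)).filter
      (fun p => p.2.toList.length == n)).map (fun p => p.1)) ↔ us[k].toList.length = n := by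
    constructor
    · intro hm
      simp only [List.mem_map, List.mem_filter] at hm
      obtain ⟨p, ⟨hp, hq⟩, hfst⟩ := hm
      rw [PySem.List.mem_enumerate_iff] at hp
      obtain ⟨j, hj, rfl⟩ := hp
      simp only [zero_add] at hfst hq
      have hjk : j = k := by exact_mod_cast hfst
      subst hjk
      simpa using hq
    · intro hn
      simp only [List.mem_map, List.mem_filter]
      refine ⟨((k : Int), us[k]), ⟨?_, by simpa using hn⟩, rfl⟩
      rw [PySem.List.mem_enumerate_iff]
      exact ⟨k, h, by simp⟩
  by_cases hn : us[k].toList.length = n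
  · rw [show (us[k].toList.length == n) = true from by simpa using hn]
    simp [pysem]
    exact ⟨h, by simpa using hn⟩
  · rw [show (us[k].toList.length == n) = false from by simpa using hn]
    simp [pysem]
    intro _
    simpa using hn

theorem get_ids_matched_spec : Claim_equal_get_ids_matched := by
  intro banned us _ hpre
  unfold Spec_get_ids_matched get_ids_matched get_ids_matched_alt
  rw [pvFoldl_eq_map, List.nil_append]
  apply List.ext_getElem
  · simp [PySem.List.len_eq, PySem.List.length_pyRange_one]
  intro k h1 h2
  have hk : k < us.length := by
    simpa [PySem.List.len_eq, PySem.List.length_pyRange_one] using h2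
  rw [List.getElem_map, List.getElem_map, PySem.List.getElem_pyRange_one]
  have h0k : (0 : Int) + (k : Int) = ((k : Nat) : Int) := by omega
  rw [h0k, pvSieve_contains, pvOk0_contains us banned.toList.length k hk]
  have hgu : PySem.List.pyGet? us ((k : Nat) : Int) = some us[k] := by
    simp [hk]
  have hall : (((PySem.List.enumerate banned.toList (0 : Int)).filter (fun p => p.2 != '*')).all
        (fun p => ((PySem.List.pyGet? us ((k : Nat) : Int)).bind (fun u => PySem.Str.pyGet? u p.1)) == some p.2))
      = (((PySem.List.enumerate banned.toList (0 : Int)).filter (fun p => p.2 != '*')).all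
        (fun p => us[k].toList[p.1.toNat]? == some p.2)) := by
    apply pvAll_congr_mem
    intro p hp
    have hp' := (List.mem_filter.mp hp).1
    rw [PySem.List.mem_enumerate_iff] at hp'
    obtain ⟨j, hj, rfl⟩ := hp'
    rw [hgu]
    simp
  rw [hall]
  have hpre' : banned.toList ≠ [] ∨ us[k].toList ≠ [] := by
    rcases hpre with h | h
    · exact Or.inl (fun hc => h (String.toList_eq_nil_iff.mp hc))
    · exact Or.inr (fun hc => h (String.toList_eq_nil_iff.mp hc ▸ List.getElem_mem hk))
  rw [pvElem_eq banned us[k] hpre']
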